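-- pv_equiv track=rewrite | github.com/miseop25/Back_Jun_Code_Study | For_code_Test/codility/test4.py | solution
-- ===== SOURCE A (Python) =====
-- def solution(A, B):
--     # write your code in Python 3.6
--     c = str(bin(A*B))
--     answer = c[2:]
--     cnt = 0
--     for i in answer :
--         if i == '1' :
--             cnt +=1
--     return cnt
-- ===== SOURCE B (Python) =====
-- def solution(A, B):
--     n = abs(A * B)
--     cnt = 0
--     while n:
--         cnt += n & 1
--         n >>= 1
--     return cnt
-- ===== Notes on version B (the rewrite author's own statement) =====
-- stated objective: alternative
-- what changed: Counts set bits of abs(A*B) with an integer shift-and-mask loop instead of building the binary string via bin() and scanning its characters.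
import Mathlib
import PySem

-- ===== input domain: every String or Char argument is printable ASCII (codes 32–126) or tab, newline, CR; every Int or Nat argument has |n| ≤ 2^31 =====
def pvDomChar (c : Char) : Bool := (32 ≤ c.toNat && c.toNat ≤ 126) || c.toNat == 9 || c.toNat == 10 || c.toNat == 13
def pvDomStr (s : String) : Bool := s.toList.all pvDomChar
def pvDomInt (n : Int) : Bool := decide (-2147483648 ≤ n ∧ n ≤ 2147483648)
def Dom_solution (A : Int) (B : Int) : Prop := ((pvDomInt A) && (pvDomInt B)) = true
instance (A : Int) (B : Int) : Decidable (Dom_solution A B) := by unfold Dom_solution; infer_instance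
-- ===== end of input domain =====

-- B replaces A's bin()-string construction and character scan by an integer
-- shift-and-mask popcount loop on abs(A*B); return value only, no side effects.

-- ===== PORT A =====
def solution (A : Int) (B : Int) : Int :=
  let c := PySem.Int.pyBin (A * B)
  let answer := PySem.List.slice c.toList (some 2) none
  answer.foldl (fun cnt i => if i == '1' then cnt + 1 else cnt) 0

-- ===== PORT B =====
-- the while-loop of Source B: while n: cnt += n & 1; n >>= 1
def solnLoop (n : Nat) (cnt : Int) : Int :=
  if n = 0 then cnt
  else solnLoop (n >>> 1) (cnt + ((n &&& 1 : Nat) : Int))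
decreasing_by simpa [Nat.shiftRight_one] using Nat.div_lt_self (Nat.pos_of_ne_zero (by assumption)) one_lt_two

def solution_alt (A : Int) (B : Int) : Int :=
  solnLoop (A * B).natAbs 0

-- ===== PRECONDITION & SPEC =====
def Spec_solution (A : Int) (B : Int) (out : Int) : Prop := out = solution_alt A B
instance (A : Int) (B : Int) (out : Int) : Decidable (Spec_solution A B out) := by unfold Spec_solution; infer_instance

-- ===== CLAIM (what is proved, stated in full; the proofs are below) =====
def Claim_equal_solution : Prop := ∀ (A : Int) (B : Int), Dom_solution A B → Spec_solution A B (solution A B)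

-- ===== LEMMAS AND PROOFS =====

/-- abstract popcount both sides are compared against -/
def pc (n : Nat) : Int :=
  if n = 0 then 0 else pc (n / 2) + ((n % 2 : Nat) : Int)
decreasing_by exact Nat.div_lt_self (Nat.pos_of_ne_zero (by assumption)) one_lt_two

lemma solnLoop_eq (n : Nat) : ∀ c : Int, solnLoop n c = c + pc n := by
  induction n using Nat.strong_induction_on with
  | _ n ih =>
    intro c
    rw [solnLoop, pc]
    by_cases h : n = 0
    · simp [h]
    · rw [if_neg h, if_neg h,
        ih (n >>> 1) (by simpa [Nat.shiftRight_one] using Nat.div_lt_self (Nat.pos_of_ne_zero h) one_lt_two)]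
      simp [Nat.shiftRight_one, Nat.and_one_is_mod]
      ring

lemma count_toDigitsCore (f : Nat) : ∀ (n : Nat) (acc : List Char), n < 2 ^ f →
    ((Nat.toDigitsCore 2 f n acc).count '1' : Int) = pc n + (acc.count '1' : Int) := by
  induction f with
  | zero => intro n acc h; interval_cases n; simp [Nat.toDigitsCore, pc]
  | succ f ih =>
    intro n acc h
    rw [Nat.toDigitsCore, pc]
    by_cases h0 : n = 0
    · subst h0; simp [Nat.digitChar]
    rw [if_neg h0]
    by_cases h2 : n / 2 = 0
    · have hn : n = 1 := by omega
      subst hn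
      simp [Nat.digitChar, pc]; ring
    · rw [if_neg h2, ih (n / 2) _ (by
        have := Nat.pow_succ 2 f
        exact Nat.div_lt_of_lt_mul (by omega))]
      have hm : n % 2 = 0 ∨ n % 2 = 1 := by omega
      rcases hm with hm | hm <;>
        simp [hm, Nat.digitChar] ; ring

lemma count_toDigits (n : Nat) : ((Nat.toDigits 2 n).count '1' : Int) = pc n := by
  have h := count_toDigitsCore (n + 1) n [] (Nat.lt_two_pow_self.trans_le (Nat.pow_le_pow_right (by omega) (by omega)))
  simpa [Nat.toDigits] using h

lemma foldl_count (l : List Char) :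
    l.foldl (fun cnt i => if i == '1' then cnt + 1 else cnt) 0 = (l.count '1' : Int) := by
  simpa using PySem.List.foldl_beq_add_one (l := l) (v := '1') (a := (0 : Int))

-- ===== VERDICT (by name: the statement is the Claim_ definition above) =====
theorem solution_spec : Claim_equal_solution := by
  unfold Claim_equal_solution
  intro A B _
  unfold Spec_solution solution solution_alt
  rw [solnLoop_eq, foldl_count]
  simp only [PySem.Int.toList_pyBin, PySem.Int.toBinChars0b]
  by_cases h : A * B < 0
  · rw [if_pos h]
    rw [show PySem.List.slice ('-' :: '0' :: 'b' :: Nat.toDigits 2 (A*B).natAbs) (some 2) none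
        = 'b' :: Nat.toDigits 2 (A*B).natAbs from by
      rw [PySem.List.slice_from _ (show (0:Int) ≤ 2 by omega)]; rfl]
    rw [List.count_cons]
    simp [count_toDigits]
  · rw [if_neg h]
    rw [show PySem.List.slice ('0' :: 'b' :: Nat.toDigits 2 (A*B).toNat) (some 2) none
        = Nat.toDigits 2 (A*B).toNat from by
      rw [PySem.List.slice_from _ (show (0:Int) ≤ 2 by omega)]; rfl]
    rw [count_toDigits, show (A * B).toNat = (A * B).natAbs from by omega]
    ring
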